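-- pv_equiv track=rewrite | github.com/toannhuynh206/march-prediction | src/math_primitives.py | score_regional_bracket
-- ===== SOURCE A (Python) =====
-- ROUND_POINTS = {
--     "R64": 10,
--     "R32": 20,
--     "S16": 40,
--     "E8": 80,
--     "F4": 160,
--     "Championship": 320,
-- }
--
-- def get_game_bit(regional_int: int, game_idx: int) -> int:
--     """Get the outcome bit for a specific game within a regional bracket.
--
--     Returns 0 (favorite wins) or 1 (upset).
--     """
--     return (regional_int >> game_idx) & 1
--
-- def score_regional_bracket(
--     regional_int: int,
--     actual_int: int,
-- ) -> int:
--     """Score a regional bracket against actual results.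
--
--     Returns total points earned using ESPN Tournament Challenge scoring.
--     """
--     rounds = ["R64"] * 8 + ["R32"] * 4 + ["S16"] * 2 + ["E8"]
--     score = 0
--     for g in range(15):
--         pred_bit = get_game_bit(regional_int, g)
--         actual_bit = get_game_bit(actual_int, g)
--         if pred_bit == actual_bit:
--             score += ROUND_POINTS[rounds[g]]
--     return score
-- ===== SOURCE B (Python) =====
-- def score_regional_bracket(regional_int: int, actual_int: int) -> int:
--     """Score a regional bracket against actual results (ESPN scoring).
--
--     Different decomposition: XOR the two bracket words once, then for each
--     round count the mismatched games with one popcount over that round's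
--     bit mask instead of looping over all 15 games bit by bit.
--     """
--     x = regional_int ^ actual_int
--     score = 0
--     for mask, games, points in ((0xFF, 8, 10), (0xF00, 4, 20), (0x3000, 2, 40), (0x4000, 1, 80)):
--         mismatches = bin(x & mask).count("1")
--         score += points * (games - mismatches)
--     return score
-- ===== Notes on version B (the rewrite author's own statement) =====
-- stated objective: alternative
-- what changed: Instead of looping over all 15 games extracting and comparing one outcome bit of each bracket per iteration, B XORs the two bracket words once and then, per round (4 iterations), counts the mismatched games with a single popcount over that round's bit mask.
import Mathlib
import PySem

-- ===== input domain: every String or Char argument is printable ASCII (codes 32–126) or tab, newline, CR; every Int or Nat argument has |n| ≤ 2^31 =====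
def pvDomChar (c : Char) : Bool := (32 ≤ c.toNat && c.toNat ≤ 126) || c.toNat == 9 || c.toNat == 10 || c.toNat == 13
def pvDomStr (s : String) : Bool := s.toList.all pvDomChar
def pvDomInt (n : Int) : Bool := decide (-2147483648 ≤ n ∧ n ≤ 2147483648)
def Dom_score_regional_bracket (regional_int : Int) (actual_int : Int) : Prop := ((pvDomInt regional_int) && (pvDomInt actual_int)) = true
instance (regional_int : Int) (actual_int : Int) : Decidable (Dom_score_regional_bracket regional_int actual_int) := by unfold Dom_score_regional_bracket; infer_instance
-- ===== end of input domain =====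

-- B replaces A's 15-iteration per-game bit loop by one XOR of the two bracket
-- words followed by a four-round popcount-per-mask pass (objective: alternative).

-- ===== PORT A =====
def ROUND_POINTS : PySem.Dict String Int :=
  PySem.Dict.ofList [("R64", 10), ("R32", 20), ("S16", 40), ("E8", 80), ("F4", 160), ("Championship", 320)]

-- Python `regional_int >> game_idx` then `& 1`; `>>` with the Nat shift amount is
-- Python-exact per PySem (A only ever calls this with game_idx = 0..14).
def get_game_bit (regional_int : Int) (game_idx : Int) : Int :=
  PySem.Int.band (regional_int >>> game_idx.toNat) 1

def score_regional_bracket (regional_int : Int) (actual_int : Int) : Int :=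
  let rounds : List String :=
    List.replicate 8 "R64" ++ List.replicate 4 "R32" ++ List.replicate 2 "S16" ++ ["E8"]
  -- rounds[g] and ROUND_POINTS[rounds[g]]: both lookups always hit (g ∈ 0..14 and every
  -- round name is a key of ROUND_POINTS), so the defaulted pyGetD/getD are exact here.
  (PySem.List.pyRange 0 15 1).foldl (fun score g =>
    let pred_bit := get_game_bit regional_int g
    let actual_bit := get_game_bit actual_int g
    if pred_bit = actual_bit then
      score + PySem.Dict.getD ROUND_POINTS (PySem.List.pyGetD rounds g "") 0
    else score) 0

-- ===== PORT B =====
-- `bin(x & mask).count("1")`: x & mask is nonnegative (mask ≥ 0), so this is exactly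
-- the population count PySem.Int.bitCount (the "0b" prefix contains no '1').
def score_regional_bracket_alt (regional_int : Int) (actual_int : Int) : Int :=
  let x := PySem.Int.bxor regional_int actual_int
  [((255 : Int), (8 : Int), (10 : Int)), (3840, 4, 20), (12288, 2, 40), (16384, 1, 80)].foldl
    (fun score mgp =>
      score + mgp.2.2 * (mgp.2.1 - (PySem.Int.bitCount (PySem.Int.band x mgp.1) : Int))) 0

-- ===== PRECONDITION & SPEC =====
def Spec_score_regional_bracket (regional_int : Int) (actual_int : Int) (out : Int) : Prop := out = score_regional_bracket_alt regional_int actual_int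
instance (regional_int : Int) (actual_int : Int) (out : Int) : Decidable (Spec_score_regional_bracket regional_int actual_int out) := by unfold Spec_score_regional_bracket; infer_instance

-- ===== CLAIM (what is proved, stated in full; the proofs are below) =====
def Claim_equal_score_regional_bracket : Prop := ∀ (regional_int : Int) (actual_int : Int), Dom_score_regional_bracket regional_int actual_int → Spec_score_regional_bracket regional_int actual_int (score_regional_bracket regional_int actual_int)

-- ===== LEMMAS AND PROOFS =====

-- Points of game g (0..14) in A's rounds layout.
def pts (g : Nat) : Int := if g < 8 then 10 else if g < 12 then 20 else if g < 14 then 40 else 80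

-- A's value as a function of the low 15 bits y of the XOR of the two inputs,
-- when the inputs have the same sign: game g matches iff bit g of y is clear.
def coreA (y : Nat) : Int :=
  ((List.range 15).map (fun g => if y.testBit g = false then pts g else 0)).sum
-- When the inputs have opposite signs: game g matches iff bit g of the XOR of the
-- nonnegative parts is SET (the negative side's bits are complemented).
def coreA' (y : Nat) : Int :=
  ((List.range 15).map (fun g => if y.testBit g = true then pts g else 0)).sum
-- B's value as a function of y, same-sign inputs.
def coreB (y : Nat) : Int :=
  ([((255 : Nat), (8 : Int), (10 : Int)), (3840, 4, 20), (12288, 2, 40), (16384, 1, 80)].map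
    (fun t => t.2.2 * (t.2.1 - (PySem.Int.bitCount ((y &&& t.1 : Nat) : Int) : Int)))).sum
-- B's value, opposite-sign inputs (the XOR word is negative: x & mask = mask - (mask & (-x-1))).
def coreB' (y : Nat) : Int :=
  ([((255 : Nat), (8 : Int), (10 : Int)), (3840, 4, 20), (12288, 2, 40), (16384, 1, 80)].map
    (fun t => t.2.2 * (t.2.1 - (PySem.Int.bitCount ((t.1 - (t.1 &&& y) : Nat) : Int) : Int)))).sum

lemma lookup_eq : ∀ g : Nat, g < 15 →
    PySem.Dict.getD ROUND_POINTS
      (PySem.List.pyGetD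
        (List.replicate 8 "R64" ++ List.replicate 4 "R32" ++ List.replicate 2 "S16" ++ ["E8"])
        ((g : Nat) : Int) "") 0 = pts g := by decide

lemma A_sum (a b : Int) : score_regional_bracket a b =
    ((List.range 15).map (fun (g : Nat) =>
      if PySem.Int.band (a >>> g) 1 = PySem.Int.band (b >>> g) 1 then pts g else 0)).sum := by
  unfold score_regional_bracket
  rw [show PySem.List.pyRange 0 15 1 = ((List.range 15).map (fun g : Nat => (g : Int))) from by decide]
  rw [List.foldl_map]
  rw [PySem.List.foldl_congr_mem _ _
    (fun (s : Int) (g : Nat) => s +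
      (if PySem.Int.band (a >>> g) 1 = PySem.Int.band (b >>> g) 1 then pts g else 0)) 0 ?_]
  · rw [PySem.List.foldl_add]
    simp
  · intro s g hg
    have hg15 := List.mem_range.mp hg
    simp only [get_game_bit, Int.toNat_natCast]
    rw [lookup_eq g hg15]
    split <;> simp

lemma bit_ofNat (n : Nat) (g : Nat) :
    PySem.Int.band ((Int.ofNat n) >>> g) 1 = ((n.testBit g).toNat : Int) := by
  show PySem.Int.band (Int.ofNat (n >>> g)) 1 = _
  rw [show Int.ofNat (n >>> g) = ((n >>> g : Nat) : Int) from rfl,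
      show (1 : Int) = ((1 : Nat) : Int) from rfl, PySem.Int.band_natCast]
  rw [Nat.and_one_is_mod, Nat.shiftRight_eq_div_pow]
  rw [Nat.toNat_testBit]

lemma bit_negSucc (m : Nat) (g : Nat) :
    PySem.Int.band ((Int.negSucc m) >>> g) 1 = ((!m.testBit g).toNat : Int) := by
  show PySem.Int.band (Int.negSucc (m >>> g)) 1 = _
  unfold PySem.Int.band
  have hneg : ¬ (0 ≤ Int.negSucc (m >>> g)) := by
    have := Int.negSucc_lt_zero (m >>> g); omega
  rw [if_neg hneg, if_pos (by omega : (0:Int) ≤ 1)]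
  have h1 : (-(Int.negSucc (m >>> g)) - 1) = ((m >>> g : Nat) : Int) := by
    rw [Int.negSucc_eq]; push_cast; ring
  rw [h1]
  simp only [Int.toNat_natCast, Int.toNat_one]
  rw [Nat.one_and_eq_mod_two]
  have := Nat.toNat_testBit m g
  rw [Nat.shiftRight_eq_div_pow]
  cases h : m.testBit g <;> simp [h] at this ⊢ <;> omega

-- low-15-bit truncation under a mask below 2^15
lemma and_mod (m x : Nat) (hm : m < 32768) : m &&& x = m &&& (x % 32768) := by
  apply Nat.eq_of_testBit_eq
  intro i
  rw [Nat.testBit_and, Nat.testBit_and, show (32768 : Nat) = 2^15 from rfl,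
      Nat.testBit_mod_two_pow]
  by_cases hi : i < 15
  · simp [hi]
  · have : m.testBit i = false := Nat.testBit_lt_two_pow (by
      calc m < 32768 := hm
      _ = 2^15 := rfl
      _ ≤ 2^i := Nat.pow_le_pow_right (by omega) (by omega))
    simp [this]

lemma testBit_xor_mod (x x' g : Nat) (hg : g < 15) :
    ((x ^^^ x') % 32768).testBit g = ((x.testBit g).xor (x'.testBit g)) := by
  rw [show (32768 : Nat) = 2^15 from rfl, Nat.testBit_mod_two_pow, Nat.testBit_xor]
  simp [hg]

-- a bitwise subset can be subtracted bit by bit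
lemma sub_eq_xor_of_subset : ∀ a b : Nat, b &&& a = b → a - b = a ^^^ b := by
  intro a
  induction a using Nat.div2Induction with
  | ind a ih =>
    intro b h
    rcases Nat.eq_zero_or_pos a with ha | ha
    · subst ha
      have : b = 0 := by rw [← h, Nat.and_zero]
      simp [this]
    · have h2 : (b / 2) &&& (a / 2) = b / 2 := by
        rw [← Nat.and_div_two, h]
      have ihh := ih ha (b / 2) h2
      have hb0 : (b.testBit 0 && a.testBit 0) = b.testBit 0 := by
        rw [← Nat.testBit_and, h]
      have hble : b / 2 ≤ a / 2 := h2 ▸ Nat.and_le_right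
      have hxd : (a ^^^ b) / 2 = a / 2 ^^^ b / 2 := Nat.xor_div_two
      have hxm : (a ^^^ b) % 2 = (a + b) % 2 := Nat.xor_mod_two_eq
      have hpar : b % 2 ≤ a % 2 := by
        rcases Nat.mod_two_eq_zero_or_one b with hb | hb
        · omega
        · have : b.testBit 0 = true := by simp [Nat.testBit_zero, hb]
          rw [this] at hb0
          simp at hb0
          omega
      omega

-- popcount of k < 2^B is the sum of its first B bits
lemma bc_sum : ∀ (B k : Nat), k < 2^B →
    PySem.Int.bitCount (k : Int) = ((List.range B).map (fun g => (k.testBit g).toNat)).sum := by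
  intro B
  induction B with
  | zero =>
    intro k hk
    interval_cases k
    simp [PySem.Int.bitCount_zero]
  | succ B ih =>
    intro k hk
    rcases Nat.eq_zero_or_pos k with h0 | h0
    · subst h0
      simp [PySem.Int.bitCount_zero, Nat.zero_testBit]
    · rw [PySem.Int.bitCount_natCast h0]
      rw [List.range_succ_eq_map, List.map_cons, List.sum_cons, List.map_map]
      have hrec := ih (k / 2) (by
        have := Nat.pow_succ 2 B ▸ hk; omega)
      rw [hrec]
      have h1 : (k.testBit 0).toNat = k % 2 := by
        rw [Nat.toNat_testBit]; simp
      have h2 : ((List.range B).map ((fun g => (k.testBit g).toNat) ∘ Nat.succ)) =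
          ((List.range B).map (fun g => ((k / 2).testBit g).toNat)) := by
        apply List.map_congr_left
        intro g _
        simp [Function.comp, Nat.testBit_succ]
      rw [h2, h1]

lemma bc15 (y m : Nat) (hm : m < 32768) :
    PySem.Int.bitCount ((y &&& m : Nat) : Int) =
      ((List.range 15).map (fun g => (y.testBit g && m.testBit g).toNat)).sum := by
  rw [bc_sum 15 (y &&& m) (lt_of_le_of_lt Nat.and_le_right hm)]
  apply congrArg List.sum
  apply List.map_congr_left
  intro g _
  rw [Nat.testBit_and]

lemma bc15' (y m : Nat) (hm : m < 32768) :
    PySem.Int.bitCount ((m - (m &&& y) : Nat) : Int) =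
      ((List.range 15).map (fun g => (!y.testBit g && m.testBit g).toNat)).sum := by
  have hsubset : (m &&& y) &&& m = m &&& y := by
    apply Nat.eq_of_testBit_eq
    intro i
    rw [Nat.testBit_and, Nat.testBit_and]
    cases m.testBit i <;> cases y.testBit i <;> simp
  rw [sub_eq_xor_of_subset m (m &&& y) hsubset]
  rw [bc_sum 15 (m ^^^ (m &&& y))
      (Nat.xor_lt_two_pow (show m < 2^15 from hm) (lt_of_le_of_lt Nat.and_le_left hm))]
  apply congrArg List.sum
  apply List.map_congr_left
  intro g _
  rw [Nat.testBit_xor, Nat.testBit_and]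
  cases m.testBit g <;> cases y.testBit g <;> simp

lemma key_split : ∀ g : Nat, g < 15 → ∀ bo : Bool, pts g
    = (if bo = false then pts g else 0)
      + (10 * ((bo && (255:Nat).testBit g).toNat : Int)
      + (20 * ((bo && (3840:Nat).testBit g).toNat : Int)
      + (40 * ((bo && (12288:Nat).testBit g).toNat : Int)
      + 80 * ((bo && (16384:Nat).testBit g).toNat : Int)))) := by decide

lemma key_split' : ∀ g : Nat, g < 15 → ∀ bo : Bool, pts g
    = (if bo = true then pts g else 0)
      + (10 * ((!bo && (255:Nat).testBit g).toNat : Int)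
      + (20 * ((!bo && (3840:Nat).testBit g).toNat : Int)
      + (40 * ((!bo && (12288:Nat).testBit g).toNat : Int)
      + 80 * ((!bo && (16384:Nat).testBit g).toNat : Int)))) := by decide

lemma core_eq (y : Nat) : coreA y = coreB y := by
  have h320 : ((List.range 15).map (fun g => pts g)).sum = 320 := by decide
  have hsplit : ((List.range 15).map (fun g => pts g)).sum =
      ((List.range 15).map (fun g =>
        (if y.testBit g = false then pts g else 0)
        + (10 * ((y.testBit g && (255:Nat).testBit g).toNat : Int)
        + (20 * ((y.testBit g && (3840:Nat).testBit g).toNat : Int)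
        + (40 * ((y.testBit g && (12288:Nat).testBit g).toNat : Int)
        + 80 * ((y.testBit g && (16384:Nat).testBit g).toNat : Int)))))).sum := by
    apply congrArg List.sum
    apply List.map_congr_left
    intro g hg
    exact key_split g (List.mem_range.mp hg) (y.testBit g)
  rw [h320] at hsplit
  rw [PySem.List.sum_map_add_int, PySem.List.sum_map_add_int, PySem.List.sum_map_add_int,
      PySem.List.sum_map_add_int, List.sum_map_mul_left, List.sum_map_mul_left,
      List.sum_map_mul_left, List.sum_map_mul_left] at hsplit
  have hB : coreB y =
      10 * (8 - (((List.range 15).map (fun g => (y.testBit g && (255:Nat).testBit g).toNat)).sum : Int))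
      + (20 * (4 - (((List.range 15).map (fun g => (y.testBit g && (3840:Nat).testBit g).toNat)).sum : Int))
      + (40 * (2 - (((List.range 15).map (fun g => (y.testBit g && (12288:Nat).testBit g).toNat)).sum : Int))
      + (80 * (1 - (((List.range 15).map (fun g => (y.testBit g && (16384:Nat).testBit g).toNat)).sum : Int)) + 0))) := by
    simp only [coreB, List.map_cons, List.map_nil, List.sum_cons, List.sum_nil,
      bc15 y 255 (by norm_num), bc15 y 3840 (by norm_num),
      bc15 y 12288 (by norm_num), bc15 y 16384 (by norm_num)]
  rw [hB]
  have hcast : ∀ m : Nat, (((List.range 15).map (fun g => (y.testBit g && (m:Nat).testBit g).toNat)).sum : Int)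
      = ((List.range 15).map (fun g => ((y.testBit g && (m:Nat).testBit g).toNat : Int))).sum := by
    intro m
    rw [Nat.cast_list_sum, List.map_map]
    rfl
  rw [hcast, hcast, hcast, hcast]
  have hA : coreA y = ((List.range 15).map (fun g => if y.testBit g = false then pts g else 0)).sum := rfl
  omega

lemma core_eq' (y : Nat) : coreA' y = coreB' y := by
  have h320 : ((List.range 15).map (fun g => pts g)).sum = 320 := by decide
  have hsplit : ((List.range 15).map (fun g => pts g)).sum =
      ((List.range 15).map (fun g =>
        (if y.testBit g = true then pts g else 0)
        + (10 * ((!y.testBit g && (255:Nat).testBit g).toNat : Int)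
        + (20 * ((!y.testBit g && (3840:Nat).testBit g).toNat : Int)
        + (40 * ((!y.testBit g && (12288:Nat).testBit g).toNat : Int)
        + 80 * ((!y.testBit g && (16384:Nat).testBit g).toNat : Int)))))).sum := by
    apply congrArg List.sum
    apply List.map_congr_left
    intro g hg
    exact key_split' g (List.mem_range.mp hg) (y.testBit g)
  rw [h320] at hsplit
  rw [PySem.List.sum_map_add_int, PySem.List.sum_map_add_int, PySem.List.sum_map_add_int,
      PySem.List.sum_map_add_int, List.sum_map_mul_left, List.sum_map_mul_left,
      List.sum_map_mul_left, List.sum_map_mul_left] at hsplit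
  have hB : coreB' y =
      10 * (8 - (((List.range 15).map (fun g => (!y.testBit g && (255:Nat).testBit g).toNat)).sum : Int))
      + (20 * (4 - (((List.range 15).map (fun g => (!y.testBit g && (3840:Nat).testBit g).toNat)).sum : Int))
      + (40 * (2 - (((List.range 15).map (fun g => (!y.testBit g && (12288:Nat).testBit g).toNat)).sum : Int))
      + (80 * (1 - (((List.range 15).map (fun g => (!y.testBit g && (16384:Nat).testBit g).toNat)).sum : Int)) + 0))) := by
    simp only [coreB', List.map_cons, List.map_nil, List.sum_cons, List.sum_nil,
      bc15' y 255 (by norm_num), bc15' y 3840 (by norm_num),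
      bc15' y 12288 (by norm_num), bc15' y 16384 (by norm_num)]
  rw [hB]
  have hcast : ∀ m : Nat, (((List.range 15).map (fun g => (!y.testBit g && (m:Nat).testBit g).toNat)).sum : Int)
      = ((List.range 15).map (fun g => ((!y.testBit g && (m:Nat).testBit g).toNat : Int))).sum := by
    intro m
    rw [Nat.cast_list_sum, List.map_map]
    rfl
  rw [hcast, hcast, hcast, hcast]
  have hA : coreA' y = ((List.range 15).map (fun g => if y.testBit g = true then pts g else 0)).sum := rfl
  omega

lemma A_nn (n n' : Nat) :
    score_regional_bracket (Int.ofNat n) (Int.ofNat n') = coreA ((n ^^^ n') % 32768) := by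
  rw [A_sum]
  apply congrArg List.sum
  apply List.map_congr_left
  intro g hg
  have hg15 := List.mem_range.mp hg
  rw [bit_ofNat, bit_ofNat]
  refine if_congr ?_ rfl rfl
  rw [testBit_xor_mod n n' g hg15]
  cases n.testBit g <;> cases n'.testBit g <;> simp

lemma A_pm (n m' : Nat) :
    score_regional_bracket (Int.ofNat n) (Int.negSucc m') = coreA' ((n ^^^ m') % 32768) := by
  rw [A_sum]
  apply congrArg List.sum
  apply List.map_congr_left
  intro g hg
  have hg15 := List.mem_range.mp hg
  rw [bit_ofNat, bit_negSucc]
  refine if_congr ?_ rfl rfl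
  rw [testBit_xor_mod n m' g hg15]
  cases n.testBit g <;> cases m'.testBit g <;> simp

lemma A_mp (m n' : Nat) :
    score_regional_bracket (Int.negSucc m) (Int.ofNat n') = coreA' ((m ^^^ n') % 32768) := by
  rw [A_sum]
  apply congrArg List.sum
  apply List.map_congr_left
  intro g hg
  have hg15 := List.mem_range.mp hg
  rw [bit_negSucc, bit_ofNat]
  refine if_congr ?_ rfl rfl
  rw [testBit_xor_mod m n' g hg15]
  cases m.testBit g <;> cases n'.testBit g <;> simp

lemma A_mm (m m' : Nat) :
    score_regional_bracket (Int.negSucc m) (Int.negSucc m') = coreA ((m ^^^ m') % 32768) := by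
  rw [A_sum]
  apply congrArg List.sum
  apply List.map_congr_left
  intro g hg
  have hg15 := List.mem_range.mp hg
  rw [bit_negSucc, bit_negSucc]
  refine if_congr ?_ rfl rfl
  rw [testBit_xor_mod m m' g hg15]
  cases m.testBit g <;> cases m'.testBit g <;> simp

lemma and_mod' (x m : Nat) (hm : m < 32768) : x &&& m = (x % 32768) &&& m := by
  rw [Nat.and_comm, and_mod m x hm, Nat.and_comm]

lemma bxor_pm (n m' : Nat) :
    PySem.Int.bxor (Int.ofNat n) (Int.negSucc m') = -(((n ^^^ m' : Nat)) : Int) - 1 := by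
  unfold PySem.Int.bxor
  have hneg : ¬ (0 ≤ Int.negSucc m') := by have := Int.negSucc_lt_zero m'; omega
  rw [if_pos (by exact Int.natCast_nonneg n), if_neg hneg]
  have h1 : (-(Int.negSucc m') - 1) = ((m' : Nat) : Int) := by
    rw [Int.negSucc_eq]; ring
  rw [h1]
  simp [Int.toNat_natCast]

lemma bxor_mp (m n' : Nat) :
    PySem.Int.bxor (Int.negSucc m) (Int.ofNat n') = -(((m ^^^ n' : Nat)) : Int) - 1 := by
  unfold PySem.Int.bxor
  have hneg : ¬ (0 ≤ Int.negSucc m) := by have := Int.negSucc_lt_zero m; omega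
  rw [if_neg hneg, if_pos (by exact Int.natCast_nonneg n')]
  have h1 : (-(Int.negSucc m) - 1) = ((m : Nat) : Int) := by
    rw [Int.negSucc_eq]; ring
  rw [h1]
  simp [Int.toNat_natCast]

lemma bxor_mm (m m' : Nat) :
    PySem.Int.bxor (Int.negSucc m) (Int.negSucc m') = (((m ^^^ m' : Nat)) : Int) := by
  unfold PySem.Int.bxor
  have hneg : ¬ (0 ≤ Int.negSucc m) := by have := Int.negSucc_lt_zero m; omega
  have hneg' : ¬ (0 ≤ Int.negSucc m') := by have := Int.negSucc_lt_zero m'; omega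
  rw [if_neg hneg, if_neg hneg']
  have h1 : (-(Int.negSucc m) - 1) = ((m : Nat) : Int) := by
    rw [Int.negSucc_eq]; ring
  have h2 : (-(Int.negSucc m') - 1) = ((m' : Nat) : Int) := by
    rw [Int.negSucc_eq]; ring
  rw [h1, h2]
  simp [Int.toNat_natCast]

lemma band_neg (k mN : Nat) :
    PySem.Int.band (-(k : Int) - 1) ((mN : Nat) : Int) = ((mN - (mN &&& k) : Nat) : Int) := by
  unfold PySem.Int.band
  rw [if_neg (by omega), if_pos (by exact Int.natCast_nonneg mN)]
  have h1 : (-(-(k : Int) - 1) - 1) = ((k : Nat) : Int) := by ring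
  rw [h1]
  simp [Int.toNat_natCast]

lemma B_nn (n n' : Nat) :
    score_regional_bracket_alt (Int.ofNat n) (Int.ofNat n') = coreB ((n ^^^ n') % 32768) := by
  show ([((255 : Int), (8 : Int), (10 : Int)), (3840, 4, 20), (12288, 2, 40), (16384, 1, 80)].foldl
    (fun score mgp =>
      score + mgp.2.2 * (mgp.2.1 - (PySem.Int.bitCount (PySem.Int.band (PySem.Int.bxor (Int.ofNat n) (Int.ofNat n')) mgp.1) : Int))) 0) = _
  rw [show Int.ofNat n = ((n : Nat) : Int) from rfl, show Int.ofNat n' = ((n' : Nat) : Int) from rfl,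
      PySem.Int.bxor_natCast]
  simp only [List.foldl_cons, List.foldl_nil, coreB, List.map_cons, List.map_nil,
    List.sum_cons, List.sum_nil]
  rw [show (255 : Int) = ((255 : Nat) : Int) from rfl, show (3840 : Int) = ((3840 : Nat) : Int) from rfl,
      show (12288 : Int) = ((12288 : Nat) : Int) from rfl, show (16384 : Int) = ((16384 : Nat) : Int) from rfl,
      PySem.Int.band_natCast, PySem.Int.band_natCast, PySem.Int.band_natCast, PySem.Int.band_natCast,
      and_mod' (n ^^^ n') 255 (by norm_num), and_mod' (n ^^^ n') 3840 (by norm_num),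
      and_mod' (n ^^^ n') 12288 (by norm_num), and_mod' (n ^^^ n') 16384 (by norm_num)]
  ring

lemma B_pm (n m' : Nat) :
    score_regional_bracket_alt (Int.ofNat n) (Int.negSucc m') = coreB' ((n ^^^ m') % 32768) := by
  show ([((255 : Int), (8 : Int), (10 : Int)), (3840, 4, 20), (12288, 2, 40), (16384, 1, 80)].foldl
    (fun score mgp =>
      score + mgp.2.2 * (mgp.2.1 - (PySem.Int.bitCount (PySem.Int.band (PySem.Int.bxor (Int.ofNat n) (Int.negSucc m')) mgp.1) : Int))) 0) = _
  rw [bxor_pm]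
  simp only [List.foldl_cons, List.foldl_nil, coreB', List.map_cons, List.map_nil,
    List.sum_cons, List.sum_nil]
  rw [show (255 : Int) = ((255 : Nat) : Int) from rfl, show (3840 : Int) = ((3840 : Nat) : Int) from rfl,
      show (12288 : Int) = ((12288 : Nat) : Int) from rfl, show (16384 : Int) = ((16384 : Nat) : Int) from rfl,
      band_neg, band_neg, band_neg, band_neg,
      and_mod 255 (n ^^^ m') (by norm_num), and_mod 3840 (n ^^^ m') (by norm_num),
      and_mod 12288 (n ^^^ m') (by norm_num), and_mod 16384 (n ^^^ m') (by norm_num)]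
  ring

lemma B_mp (m n' : Nat) :
    score_regional_bracket_alt (Int.negSucc m) (Int.ofNat n') = coreB' ((m ^^^ n') % 32768) := by
  show ([((255 : Int), (8 : Int), (10 : Int)), (3840, 4, 20), (12288, 2, 40), (16384, 1, 80)].foldl
    (fun score mgp =>
      score + mgp.2.2 * (mgp.2.1 - (PySem.Int.bitCount (PySem.Int.band (PySem.Int.bxor (Int.negSucc m) (Int.ofNat n')) mgp.1) : Int))) 0) = _
  rw [bxor_mp]
  simp only [List.foldl_cons, List.foldl_nil, coreB', List.map_cons, List.map_nil,
    List.sum_cons, List.sum_nil]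
  rw [show (255 : Int) = ((255 : Nat) : Int) from rfl, show (3840 : Int) = ((3840 : Nat) : Int) from rfl,
      show (12288 : Int) = ((12288 : Nat) : Int) from rfl, show (16384 : Int) = ((16384 : Nat) : Int) from rfl,
      band_neg, band_neg, band_neg, band_neg,
      and_mod 255 (m ^^^ n') (by norm_num), and_mod 3840 (m ^^^ n') (by norm_num),
      and_mod 12288 (m ^^^ n') (by norm_num), and_mod 16384 (m ^^^ n') (by norm_num)]
  ring

lemma B_mm (m m' : Nat) :
    score_regional_bracket_alt (Int.negSucc m) (Int.negSucc m') = coreB ((m ^^^ m') % 32768) := by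
  show ([((255 : Int), (8 : Int), (10 : Int)), (3840, 4, 20), (12288, 2, 40), (16384, 1, 80)].foldl
    (fun score mgp =>
      score + mgp.2.2 * (mgp.2.1 - (PySem.Int.bitCount (PySem.Int.band (PySem.Int.bxor (Int.negSucc m) (Int.negSucc m')) mgp.1) : Int))) 0) = _
  rw [bxor_mm]
  simp only [List.foldl_cons, List.foldl_nil, coreB, List.map_cons, List.map_nil,
    List.sum_cons, List.sum_nil]
  rw [show (255 : Int) = ((255 : Nat) : Int) from rfl, show (3840 : Int) = ((3840 : Nat) : Int) from rfl,
      show (12288 : Int) = ((12288 : Nat) : Int) from rfl, show (16384 : Int) = ((16384 : Nat) : Int) from rfl,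
      PySem.Int.band_natCast, PySem.Int.band_natCast, PySem.Int.band_natCast, PySem.Int.band_natCast,
      and_mod' (m ^^^ m') 255 (by norm_num), and_mod' (m ^^^ m') 3840 (by norm_num),
      and_mod' (m ^^^ m') 12288 (by norm_num), and_mod' (m ^^^ m') 16384 (by norm_num)]
  ring

-- ===== VERDICT (by name: the statement is the Claim_ definition above) =====
theorem score_regional_bracket_spec : Claim_equal_score_regional_bracket := by
  intro a b _
  unfold Spec_score_regional_bracket
  cases a with
  | ofNat n => cases b with
    | ofNat n' => rw [A_nn, B_nn, core_eq]
    | negSucc m' => rw [A_pm, B_pm, core_eq']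
  | negSucc m => cases b with
    | ofNat n' => rw [A_mp, B_mp, core_eq']
    | negSucc m' => rw [A_mm, B_mm, core_eq]
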